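-- pv_equiv track=rewrite | github.com/gab-luz/hanauta | hanauta/src/pyqt/settings-page/settings_page/picom_rules.py | _parse_picom_matcher
-- ===== SOURCE A (Python) =====
-- def _escape_picom_string(value: str) -> str:
--     return value.replace("\\", "\\\\").replace("'", "\\'")
--
-- def _parse_picom_matcher(text: str) -> str:
--     stripped = text.strip()
--     lowered = stripped.lower()
--     prefixes = {
--         "window_name_contains:": lambda value: (
--             f"name *= '{_escape_picom_string(value)}'"
--         ),
--         "window_name:": lambda value: f"name = '{_escape_picom_string(value)}'",
--         "class:": lambda value: f"class_g = '{_escape_picom_string(value)}'",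
--         "window_type:": lambda value: f"window_type = '{_escape_picom_string(value)}'",
--         "raw:": lambda value: value,
--     }
--     for prefix, builder in prefixes.items():
--         if lowered.startswith(prefix):
--             return builder(stripped[len(prefix) :].strip())
--     return stripped
-- ===== SOURCE B (Python) =====
-- def _escape_picom_string(value: str) -> str:
--     return value.replace("\\", "\\\\").replace("'", "\\'")
--
-- _BUILDERS = {
--     "window_name_contains": lambda value: f"name *= '{_escape_picom_string(value)}'",
--     "window_name": lambda value: f"name = '{_escape_picom_string(value)}'",
--     "class": lambda value: f"class_g = '{_escape_picom_string(value)}'",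
--     "window_type": lambda value: f"window_type = '{_escape_picom_string(value)}'",
--     "raw": lambda value: value,
-- }
--
-- def _parse_picom_matcher(text: str) -> str:
--     stripped = text.strip()
--     key, sep, rest = stripped.partition(":")
--     if sep == ":":
--         builder = _BUILDERS.get(key.lower())
--         if builder is not None:
--             return builder(rest.strip())
--     return stripped
-- ===== Notes on version B (the rewrite author's own statement) =====
-- stated objective: idiomatic
-- what changed: Replaces A's ordered scan of five startswith-prefix tests by a single partition of the stripped text at its first colon followed by an exact lowercased-key lookup in a builder table.
import Mathlib
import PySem

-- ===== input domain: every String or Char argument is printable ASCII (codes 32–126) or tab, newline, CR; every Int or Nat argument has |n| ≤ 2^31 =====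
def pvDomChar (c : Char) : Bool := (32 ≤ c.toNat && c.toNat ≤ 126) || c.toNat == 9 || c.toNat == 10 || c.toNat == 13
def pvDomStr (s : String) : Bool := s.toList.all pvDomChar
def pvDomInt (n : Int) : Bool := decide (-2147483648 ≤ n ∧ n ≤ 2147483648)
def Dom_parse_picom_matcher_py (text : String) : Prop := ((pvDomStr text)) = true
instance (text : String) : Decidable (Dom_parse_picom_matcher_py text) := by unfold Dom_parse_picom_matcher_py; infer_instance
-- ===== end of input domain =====

-- B replaces A's ordered startswith-prefix scan by a single partition at the first colon plus an
-- exact-key table lookup (idiomatic decomposition; same behaviour, no speed claim).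

-- ===== PORT A =====
def pvEscape (value : String) : String :=
  PySem.Str.replace (PySem.Str.replace value "\\" "\\\\") "'" "\\'"

def parse_picom_matcher_py (text : String) : String :=
  let stripped := PySem.Str.strip text
  let lowered := PySem.Str.lower stripped
  if PySem.Str.startswith lowered "window_name_contains:" then
    "name *= '" ++ pvEscape (PySem.Str.strip (PySem.Str.slice stripped (some 21) none)) ++ "'"
  else if PySem.Str.startswith lowered "window_name:" then
    "name = '" ++ pvEscape (PySem.Str.strip (PySem.Str.slice stripped (some 12) none)) ++ "'"
  else if PySem.Str.startswith lowered "class:" then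
    "class_g = '" ++ pvEscape (PySem.Str.strip (PySem.Str.slice stripped (some 6) none)) ++ "'"
  else if PySem.Str.startswith lowered "window_type:" then
    "window_type = '" ++ pvEscape (PySem.Str.strip (PySem.Str.slice stripped (some 12) none)) ++ "'"
  else if PySem.Str.startswith lowered "raw:" then
    PySem.Str.strip (PySem.Str.slice stripped (some 4) none)
  else stripped

-- ===== PORT B =====
-- B's module-level builder table (a dict of key → builder, ported as an association list, first-match lookup).
def pvBuilders : List (String × (String → String)) :=
  [("window_name_contains", fun value => "name *= '" ++ pvEscape value ++ "'"),
   ("window_name", fun value => "name = '" ++ pvEscape value ++ "'"),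
   ("class", fun value => "class_g = '" ++ pvEscape value ++ "'"),
   ("window_type", fun value => "window_type = '" ++ pvEscape value ++ "'"),
   ("raw", fun value => value)]

def parse_picom_matcher_py_alt (text : String) : String :=
  let stripped := PySem.Str.strip text
  -- str.partition(":") ported by hand via find (exact: the separator is present iff find ≥ 0;
  -- key = the text before the first ':', rest = the text after it)
  let i := PySem.Str.find stripped ":"
  if 0 ≤ i then
    let key := PySem.Str.slice stripped none (some i)
    let rest := PySem.Str.slice stripped (some (i + 1)) none
    match pvBuilders.lookup (PySem.Str.lower key) with
    | some builder => builder (PySem.Str.strip rest)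
    | none => stripped
  else stripped

-- ===== PRECONDITION & SPEC =====
def Spec_parse_picom_matcher_py (text : String) (out : String) : Prop := out = parse_picom_matcher_py_alt text
instance (text : String) (out : String) : Decidable (Spec_parse_picom_matcher_py text out) := by unfold Spec_parse_picom_matcher_py; infer_instance

-- ===== CLAIM (what is proved, stated in full; the proofs are below) =====
def Claim_equal_parse_picom_matcher_py : Prop := ∀ (text : String), Dom_parse_picom_matcher_py text → Spec_parse_picom_matcher_py text (parse_picom_matcher_py text)

-- ===== LEMMAS AND PROOFS =====

-- Python's str.lower moves only A–Z; in particular it can neither create nor destroy a ':'.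
theorem pv_lowerChar_eq_colon (c : Char) (h : PySem.Chars.lowerChar c = ':') : c = ':' := by
  unfold PySem.Chars.lowerChar PySem.Chars.isupper at h
  split_ifs at h with hu
  · exfalso
    simp [Char.le_def, UInt32.le_iff_toNat_le] at hu
    have hval : Nat.isValidChar (c.toNat + 32) := by
      left
      have h90 : c.val.toNat ≤ 90 := le_trans hu.2 (by norm_num)
      unfold Char.toNat
      omega
    have h1 : (Char.ofNat (c.toNat + 32)).toNat = c.toNat + 32 := by
      rw [Char.toNat_ofNat, if_pos hval]
    have h2 := congrArg Char.toNat h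
    rw [h1] at h2
    have h58 : (':' : Char).toNat = 58 := by decide
    rw [h58] at h2
    have h65 : 65 ≤ c.val.toNat := le_trans (by norm_num) hu.1
    unfold Char.toNat at h2
    omega
  · exact h

theorem pv_colon_not_mem_lower (xs : List Char) (h : ':' ∉ xs) :
    ':' ∉ PySem.Chars.lower xs := by
  intro hmem
  simp only [PySem.Chars.lower, List.mem_map] at hmem
  obtain ⟨c, hc, hlc⟩ := hmem
  exact h ((pv_lowerChar_eq_colon c hlc) ▸ hc)

-- A colon-free prefix before the separator must be exactly the text before the separator.
theorem pv_colon_prefix_iff (k P Q : List Char) : ':' ∉ k → ':' ∉ P →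
    (((k ++ [':']) <+: (P ++ ':' :: Q)) ↔ k = P) := by
  induction k generalizing P with
  | nil =>
    intro _ hP
    cases P with
    | nil => simp
    | cons c P' =>
      simp only [List.mem_cons, not_or] at hP
      simp only [List.nil_append, List.cons_append]
      constructor
      · intro h
        exact absurd (List.cons_prefix_cons.mp h).1 hP.1
      · intro h; cases h
  | cons a k' ih =>
    intro hk hP
    simp only [List.mem_cons, not_or] at hk
    cases P with
    | nil =>
      simp only [List.cons_append, List.nil_append]
      constructor
      · intro h
        exact absurd (List.cons_prefix_cons.mp h).1 (fun he => hk.1 he.symm)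
      · intro h; cases h
    | cons c P' =>
      simp only [List.mem_cons, not_or] at hP
      simp only [List.cons_append, List.cons_prefix_cons, List.cons_eq_cons]
      rw [ih P' hk.2 hP.2]

-- A's branch test: lowered text starts with "key:" iff the lowered text before the first colon is "key".
theorem pv_cond_iff (l k : List Char) (nn : Nat)
    (h1 : l.drop nn = ':' :: l.drop (nn + 1)) (h2 : ':' ∉ l.take nn) (hk : ':' ∉ k) :
    (PySem.Chars.startswith (PySem.Chars.lower l) (k ++ [':']) = true ↔
      PySem.Chars.lower (l.take nn) = k) := by
  rw [PySem.Chars.startswith_iff]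
  have hlc : PySem.Chars.lowerChar ':' = ':' := by decide
  have hdec : PySem.Chars.lower l =
      PySem.Chars.lower (l.take nn) ++ ':' :: PySem.Chars.lower (l.drop (nn + 1)) := by
    conv_lhs => rw [← List.take_append_drop nn l, h1]
    simp [PySem.Chars.lower, hlc]
  rw [hdec, pv_colon_prefix_iff k _ _ hk (pv_colon_not_mem_lower _ h2), eq_comm]

theorem pv_notstart (l p : List Char) (hp : ':' ∈ p) (hcol : ':' ∉ l) :
    PySem.Chars.startswith (PySem.Chars.lower l) p = false := by
  rw [Bool.eq_false_iff]
  intro h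
  rw [PySem.Chars.startswith_iff] at h
  exact (pv_colon_not_mem_lower l hcol) (h.subset hp)

-- ===== VERDICT (by name: the statement is the Claim_ definition above) =====
set_option maxHeartbeats 1000000 in
theorem parse_picom_matcher_py_spec : Claim_equal_parse_picom_matcher_py := by
  intro text _
  show parse_picom_matcher_py text = parse_picom_matcher_py_alt text
  simp only [parse_picom_matcher_py, parse_picom_matcher_py_alt,
    PySem.Str.startswith_eq, PySem.Str.toList_lower]
  set s := PySem.Str.strip text with hs
  set l := s.toList with hl
  set n := PySem.Str.find s ":" with hn
  have hfind : n = PySem.Chars.find l [':'] := by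
    rw [hn, PySem.Str.find_eq]; rfl
  by_cases hfound : 0 ≤ n
  · -- a colon occurs in the stripped text
    set nn := n.toNat with hnn'
    have hnn : (nn : Int) = n := Int.toNat_of_nonneg hfound
    obtain ⟨hpre, hmin⟩ :=
      PySem.Chars.find_spec (s := l) (sub := [':']) (by rw [← hfind]; exact hfound)
    rw [← hfind] at hpre hmin
    obtain ⟨t, ht⟩ := hpre
    have htail : t = l.drop (nn + 1) := by
      have h := congrArg List.tail ht
      simp only [List.tail_drop] at h
      rw [hnn']
      simpa using h
    have h1 : l.drop nn = ':' :: l.drop (nn + 1) := by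
      rw [← ht, htail]; rfl
    have h2 : ':' ∉ l.take nn := by
      intro hmem
      obtain ⟨i, hi, hget⟩ := List.mem_iff_getElem.mp hmem
      rw [List.length_take] at hi
      have hilt : i < nn := by omega
      have hil : i < l.length := by omega
      apply hmin i hilt
      have hli : l[i] = ':' := by
        rw [List.getElem_take] at hget; exact hget
      have hdropi : l.drop i = ':' :: l.drop (i + 1) := by
        rw [List.drop_eq_getElem_cons hil, hli]
      exact ⟨l.drop (i + 1), by rw [hdropi]; rfl⟩
    have hlen : nn < l.length := by
      by_contra hge
      have hnil : l.drop nn = [] := List.drop_eq_nil_iff.mpr (by omega)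
      rw [h1] at hnil; cases hnil
    set T := PySem.Chars.lower (l.take nn) with hT
    have hTlen : T.length = nn := by
      simp [hT, PySem.Chars.lower]
      omega
    have hkey : (PySem.Str.lower (PySem.Str.slice s none (some n))).toList = T := by
      rw [PySem.Str.toList_lower, PySem.Str.toList_slice, PySem.Chars.slice_eq_listSlice,
        ← hl, ← hnn, PySem.List.slice_to_natCast]
    have hBkey : ∀ (K : String), T = K.toList →
        PySem.Str.lower (PySem.Str.slice s none (some n)) = K := by
      intro K hK
      exact String.toList_inj.mp (by rw [hkey, hK])
    have hBne : ∀ (K : String), T ≠ K.toList →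
        (PySem.Str.lower (PySem.Str.slice s none (some n)) == K) = false := by
      intro K hK
      apply beq_eq_false_iff_ne.mpr
      intro hEq
      exact hK (by rw [← hkey, hEq])
    have hc1 : PySem.Chars.startswith (PySem.Chars.lower l) (['w', 'i', 'n', 'd', 'o', 'w', '_', 'n', 'a', 'm', 'e', '_', 'c', 'o', 'n', 't', 'a', 'i', 'n', 's', ':'] : List Char) = true ↔ PySem.Chars.lower (l.take nn) = "window_name_contains".toList := by
      rw [show (['w', 'i', 'n', 'd', 'o', 'w', '_', 'n', 'a', 'm', 'e', '_', 'c', 'o', 'n', 't', 'a', 'i', 'n', 's', ':'] : List Char) = "window_name_contains".toList ++ [':'] from by decide]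
      exact pv_cond_iff l "window_name_contains".toList nn h1 h2 (by decide)
    have hc2 : PySem.Chars.startswith (PySem.Chars.lower l) (['w', 'i', 'n', 'd', 'o', 'w', '_', 'n', 'a', 'm', 'e', ':'] : List Char) = true ↔ PySem.Chars.lower (l.take nn) = "window_name".toList := by
      rw [show (['w', 'i', 'n', 'd', 'o', 'w', '_', 'n', 'a', 'm', 'e', ':'] : List Char) = "window_name".toList ++ [':'] from by decide]
      exact pv_cond_iff l "window_name".toList nn h1 h2 (by decide)
    have hc3 : PySem.Chars.startswith (PySem.Chars.lower l) (['c', 'l', 'a', 's', 's', ':'] : List Char) = true ↔ PySem.Chars.lower (l.take nn) = "class".toList := by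
      rw [show (['c', 'l', 'a', 's', 's', ':'] : List Char) = "class".toList ++ [':'] from by decide]
      exact pv_cond_iff l "class".toList nn h1 h2 (by decide)
    have hc4 : PySem.Chars.startswith (PySem.Chars.lower l) (['w', 'i', 'n', 'd', 'o', 'w', '_', 't', 'y', 'p', 'e', ':'] : List Char) = true ↔ PySem.Chars.lower (l.take nn) = "window_type".toList := by
      rw [show (['w', 'i', 'n', 'd', 'o', 'w', '_', 't', 'y', 'p', 'e', ':'] : List Char) = "window_type".toList ++ [':'] from by decide]
      exact pv_cond_iff l "window_type".toList nn h1 h2 (by decide)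
    have hc5 : PySem.Chars.startswith (PySem.Chars.lower l) (['r', 'a', 'w', ':'] : List Char) = true ↔ PySem.Chars.lower (l.take nn) = "raw".toList := by
      rw [show (['r', 'a', 'w', ':'] : List Char) = "raw".toList ++ [':'] from by decide]
      exact pv_cond_iff l "raw".toList nn h1 h2 (by decide)
    by_cases e1 : T = "window_name_contains".toList
    · have hA1 : PySem.Chars.startswith (PySem.Chars.lower l) (['w', 'i', 'n', 'd', 'o', 'w', '_', 'n', 'a', 'm', 'e', '_', 'c', 'o', 'n', 't', 'a', 'i', 'n', 's', ':'] : List Char) = true := hc1.mpr (hT ▸ e1)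
      have hB := hBkey _ e1
      have hnval : n = 20 := by
        have hL := congrArg List.length e1
        rw [hTlen] at hL
        simp at hL
        omega
      rw [hnval] at hB
      simp [hA1, hB, pvBuilders, List.lookup, hnval, hfound]
      try norm_num
    · have hA1 : PySem.Chars.startswith (PySem.Chars.lower l) (['w', 'i', 'n', 'd', 'o', 'w', '_', 'n', 'a', 'm', 'e', '_', 'c', 'o', 'n', 't', 'a', 'i', 'n', 's', ':'] : List Char) = false :=
        Bool.eq_false_iff.mpr (fun h => e1 (hT ▸ hc1.mp h))
      by_cases e2 : T = "window_name".toList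
      · have hA2 : PySem.Chars.startswith (PySem.Chars.lower l) (['w', 'i', 'n', 'd', 'o', 'w', '_', 'n', 'a', 'm', 'e', ':'] : List Char) = true := hc2.mpr (hT ▸ e2)
        have hB := hBkey _ e2
        have hnval : n = 11 := by
          have hL := congrArg List.length e2
          rw [hTlen] at hL
          simp at hL
          omega
        rw [hnval] at hB
        simp [hA1, hA2, hB, pvBuilders, List.lookup, hnval, hfound]
        try norm_num
      · have hA2 : PySem.Chars.startswith (PySem.Chars.lower l) (['w', 'i', 'n', 'd', 'o', 'w', '_', 'n', 'a', 'm', 'e', ':'] : List Char) = false :=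
          Bool.eq_false_iff.mpr (fun h => e2 (hT ▸ hc2.mp h))
        by_cases e3 : T = "class".toList
        · have hA3 : PySem.Chars.startswith (PySem.Chars.lower l) (['c', 'l', 'a', 's', 's', ':'] : List Char) = true := hc3.mpr (hT ▸ e3)
          have hB := hBkey _ e3
          have hnval : n = 5 := by
            have hL := congrArg List.length e3
            rw [hTlen] at hL
            simp at hL
            omega
          rw [hnval] at hB
          simp [hA1, hA2, hA3, hB, pvBuilders, List.lookup, hnval, hfound]
          try norm_num
        · have hA3 : PySem.Chars.startswith (PySem.Chars.lower l) (['c', 'l', 'a', 's', 's', ':'] : List Char) = false :=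
            Bool.eq_false_iff.mpr (fun h => e3 (hT ▸ hc3.mp h))
          by_cases e4 : T = "window_type".toList
          · have hA4 : PySem.Chars.startswith (PySem.Chars.lower l) (['w', 'i', 'n', 'd', 'o', 'w', '_', 't', 'y', 'p', 'e', ':'] : List Char) = true := hc4.mpr (hT ▸ e4)
            have hB := hBkey _ e4
            have hnval : n = 11 := by
              have hL := congrArg List.length e4
              rw [hTlen] at hL
              simp at hL
              omega
            rw [hnval] at hB
            simp [hA1, hA2, hA3, hA4, hB, pvBuilders, List.lookup, hnval, hfound]
            try norm_num
          · have hA4 : PySem.Chars.startswith (PySem.Chars.lower l) (['w', 'i', 'n', 'd', 'o', 'w', '_', 't', 'y', 'p', 'e', ':'] : List Char) = false :=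
              Bool.eq_false_iff.mpr (fun h => e4 (hT ▸ hc4.mp h))
            by_cases e5 : T = "raw".toList
            · have hA5 : PySem.Chars.startswith (PySem.Chars.lower l) (['r', 'a', 'w', ':'] : List Char) = true := hc5.mpr (hT ▸ e5)
              have hB := hBkey _ e5
              have hnval : n = 3 := by
                have hL := congrArg List.length e5
                rw [hTlen] at hL
                simp at hL
                omega
              rw [hnval] at hB
              simp [hA1, hA2, hA3, hA4, hA5, hB, pvBuilders, List.lookup, hnval, hfound]
              try norm_num
            · have hA5 : PySem.Chars.startswith (PySem.Chars.lower l) (['r', 'a', 'w', ':'] : List Char) = false :=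
                Bool.eq_false_iff.mpr (fun h => e5 (hT ▸ hc5.mp h))
              have hBnone : pvBuilders.lookup (PySem.Str.lower (PySem.Str.slice s none (some n))) = none := by
                simp [pvBuilders, List.lookup, hBne _ e1, hBne _ e2, hBne _ e3, hBne _ e4, hBne _ e5]
              simp [hA1, hA2, hA3, hA4, hA5, hBnone, hfound]
  · -- no colon in the stripped text: every branch of A fails and B falls through
    have hneg : n = -1 := by
      have hge : -1 ≤ n := by rw [hfind]; exact PySem.Chars.neg_one_le_find l [':']
      omega
    have hnin : ':' ∉ l := by
      intro hmem
      obtain ⟨l1, l2, hsplit⟩ := List.append_of_mem hmem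
      have hinf : [':'] <:+: l := ⟨l1, l2, by rw [hsplit]; simp⟩
      exact (PySem.Chars.find_eq_neg_one_iff l [':']).mp (by rw [← hfind]; exact hneg) hinf
    have hA1 : PySem.Chars.startswith (PySem.Chars.lower l) (['w', 'i', 'n', 'd', 'o', 'w', '_', 'n', 'a', 'm', 'e', '_', 'c', 'o', 'n', 't', 'a', 'i', 'n', 's', ':'] : List Char) = false := pv_notstart l _ (by decide) hnin
    have hA2 : PySem.Chars.startswith (PySem.Chars.lower l) (['w', 'i', 'n', 'd', 'o', 'w', '_', 'n', 'a', 'm', 'e', ':'] : List Char) = false := pv_notstart l _ (by decide) hnin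
    have hA3 : PySem.Chars.startswith (PySem.Chars.lower l) (['c', 'l', 'a', 's', 's', ':'] : List Char) = false := pv_notstart l _ (by decide) hnin
    have hA4 : PySem.Chars.startswith (PySem.Chars.lower l) (['w', 'i', 'n', 'd', 'o', 'w', '_', 't', 'y', 'p', 'e', ':'] : List Char) = false := pv_notstart l _ (by decide) hnin
    have hA5 : PySem.Chars.startswith (PySem.Chars.lower l) (['r', 'a', 'w', ':'] : List Char) = false := pv_notstart l _ (by decide) hnin
    simp [hA1, hA2, hA3, hA4, hA5, hfound]
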